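-- pv_equiv track=rewrite | github.com/dee021/CodingTest | 프로그래머스/2/142085. 디펜스 게임/디펜스 게임.py | solution
-- ===== SOURCE A (Python) =====
-- from heapq import heappop, heappush
--
-- def solution(n, k, enemy):
--     pq = []
--     cnt = 0
--     for i in range(len(enemy)):
--         cnt += enemy[i]
--         heappush(pq, -enemy[i])
--         while cnt > n and k and pq:
--             k -= 1
--             cnt += heappop(pq)
--         if cnt > n:
--             return i
--
--     return len(enemy)
-- ===== SOURCE B (Python) =====
-- from heapq import heappop, heappush
--
-- def solution(n, k, enemy):
--     # keep the k largest waves blocked in a bounded min-heap; overflow is damage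
--     used = []
--     hp = n
--     for i in range(len(enemy)):
--         heappush(used, enemy[i])
--         if len(used) > k:
--             hp -= heappop(used)
--         if hp < 0:
--             return i
--     return len(enemy)
-- ===== Notes on version B (the rewrite author's own statement) =====
-- stated objective: idiomatic
-- what changed: Instead of accumulating all HP into cnt on an unbounded max-heap and draining the maximum in a while loop when it overflows, B maintains a min-heap of at most k blocked waves and a running hp, charging each evicted (smallest blocked) wave as damage - a single if per round, no while drain.
-- outside the precondition, e.g. on solution(10, -1, [20, 5]): A returns 2, B returns 0; on solution(-5, 3, [-8, 6, 0, -1]): A returns 4, B returns 0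
import Mathlib
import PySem

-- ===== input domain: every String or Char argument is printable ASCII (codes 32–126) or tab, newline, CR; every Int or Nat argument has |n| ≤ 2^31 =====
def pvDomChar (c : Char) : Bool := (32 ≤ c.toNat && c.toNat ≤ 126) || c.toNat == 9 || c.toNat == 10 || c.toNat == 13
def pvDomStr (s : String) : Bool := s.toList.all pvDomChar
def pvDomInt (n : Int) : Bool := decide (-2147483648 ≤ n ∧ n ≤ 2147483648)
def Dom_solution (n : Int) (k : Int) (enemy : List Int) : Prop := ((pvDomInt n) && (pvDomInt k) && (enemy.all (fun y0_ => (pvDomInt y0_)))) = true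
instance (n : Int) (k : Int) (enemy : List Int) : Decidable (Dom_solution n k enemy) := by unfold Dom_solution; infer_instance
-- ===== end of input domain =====

-- B maintains a bounded min-heap of the k blocked waves and a running hp instead of A's
-- unbounded max-heap with a while-drain of the accumulated count (objective: idiomatic).

-- ===== PORT A =====
-- heapq is modelled by its ordered multiset: heappush = ordered insert, heappop = take the
-- head (the minimum) — exact for these programs, which observe a heap only through heappop minima.
def hpush (x : Int) : List Int → List Int
  | [] => [x]
  | y :: ys => if x ≤ y then x :: y :: ys else y :: hpush x ys

-- the `while cnt > n and k and pq` drain (`pq` empty ends the loop, like the `and pq` guard)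
def drainA (n : Int) : List Int → Int → Int → List Int × Int × Int
  | [], cnt, kk => ([], cnt, kk)
  | p :: rest, cnt, kk =>
    if cnt > n ∧ kk ≠ 0 then drainA n rest (cnt + p) (kk - 1) else (p :: rest, cnt, kk)

def loopA (n : Int) : List Int → Int → List Int → Int → Int → Int
  | [], i, _pq, _cnt, _kk => i
  | e :: rest, i, pq, cnt, kk =>
    let s := drainA n (hpush (-e) pq) (cnt + e) kk
    if s.2.1 > n then i else loopA n rest (i + 1) s.1 s.2.1 s.2.2

def solution (n : Int) (k : Int) (enemy : List Int) : Int :=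
  loopA n enemy 0 [] 0 k

-- ===== PORT B =====
def loopB (n : Int) (k : Int) : List Int → Int → List Int → Int → Int
  | [], i, _used, _hp => i
  | e :: rest, i, used, hp =>
    let u1 := hpush e used
    let s : List Int × Int :=
      if (u1.length : Int) > k then
        match u1 with
        | [] => ([], hp)          -- unreachable: u1 = hpush e used ≠ []
        | m :: us => (us, hp - m)
      else (u1, hp)
    if s.2 < 0 then i else loopB n k rest (i + 1) s.1 s.2

def solution_alt (n : Int) (k : Int) (enemy : List Int) : Int :=
  loopB n k enemy 0 [] n

-- ===== PRECONDITION & SPEC =====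
def sumPos (l : List Int) : Int := (l.map (fun e => max e 0)).sum
def sumNeg (l : List Int) : Int := (l.map (fun e => min e 0)).sum
-- Pre_ admits the game's natural domain (non-negative immunity count and non-negative waves)
-- plus every input whose outcome is forced regardless of immunities (n at least the total
-- positive damage: both survive everything; n below the total negative damage: both fail at
-- round 0). Outside it A still returns (a negative k is always truthy in `while … and k`,
-- acting as unlimited immunities, and on negative waves the greedy max-drain diverges from
-- blocking the k largest) but that behaviour is accidental and B does not mirror it.
def Pre_solution (n : Int) (k : Int) (enemy : List Int) : Prop :=
  (0 ≤ k ∧ ∀ e ∈ enemy, 0 ≤ e) ∨ sumPos enemy ≤ n ∨ n < sumNeg enemy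
instance (n : Int) (k : Int) (enemy : List Int) : Decidable (Pre_solution n k enemy) := by
  unfold Pre_solution; infer_instance

def pvWitness_solution : Int × Int × List Int := (7, 1, [4, 2, 4, 8])

def Spec_solution (n : Int) (k : Int) (enemy : List Int) (out : Int) : Prop :=
  out = solution_alt n k enemy
instance (n : Int) (k : Int) (enemy : List Int) (out : Int) : Decidable (Spec_solution n k enemy out) := by
  unfold Spec_solution; infer_instance

-- ===== CLAIM =====
def Claim_equal_solution : Prop :=
  ∀ (n : Int) (k : Int) (enemy : List Int), Dom_solution n k enemy → Pre_solution n k enemy →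
    Spec_solution n k enemy (solution n k enemy)

-- ===== LEMMAS AND PROOFS =====

theorem hpush_perm (x : Int) (l : List Int) : (hpush x l).Perm (x :: l) := by
  induction l with
  | nil => simp [hpush]
  | cons y ys ih =>
    simp only [hpush]
    split
    · exact List.Perm.refl _
    · exact (ih.cons y).trans (List.Perm.swap x y ys)

theorem hpush_sorted (x : Int) (l : List Int) (h : l.Pairwise (· ≤ ·)) :
    (hpush x l).Pairwise (· ≤ ·) := by
  induction l with
  | nil => simp [hpush]
  | cons y ys ih =>
    simp only [hpush]
    split
    · rename_i hxy
      refine List.Pairwise.cons ?_ h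
      intro z hz
      rcases List.mem_cons.mp hz with hz | hz
      · omega
      · exact le_trans hxy ((List.pairwise_cons.mp h).1 z hz)
    · rename_i hxy
      have hys := (List.pairwise_cons.mp h).2
      refine List.Pairwise.cons ?_ (ih hys)
      intro z hz
      have hz'' := (hpush_perm x ys).mem_iff.mp hz
      rcases List.mem_cons.mp hz'' with hz' | hz'
      · subst hz'; omega
      · exact (List.pairwise_cons.mp h).1 z hz'

theorem hpush_ne_nil (x : Int) (l : List Int) : hpush x l ≠ [] := by
  cases l with
  | nil => simp [hpush]
  | cons y ys => simp only [hpush]; split <;> simp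

theorem sorted_head_le (y : Int) (ys : List Int) (h : (y :: ys).Pairwise (· ≤ ·)) :
    ∀ z ∈ y :: ys, y ≤ z := by
  intro z hz
  rcases List.mem_cons.mp hz with hz | hz
  · omega
  · exact (List.pairwise_cons.mp h).1 z hz

theorem sorted_sum_ge (m : Int) (l : List Int) (h : ∀ z ∈ l, m ≤ z) (h0 : 0 ≤ m)
    (hne : l ≠ []) : m ≤ l.sum := by
  cases l with
  | nil => exact absurd rfl hne
  | cons y ys =>
    have h1 : m ≤ y := h y (by simp)
    have h2 : 0 ≤ ys.sum := by
      apply List.sum_nonneg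
      intro z hz
      exact le_trans h0 (h z (by simp [hz]))
    simp [List.sum_cons]; omega

-- insertion sort via hpush
def srt (l : List Int) : List Int := l.foldr hpush []

theorem srt_perm (l : List Int) : (srt l).Perm l := by
  induction l with
  | nil => simp [srt]
  | cons y ys ih => exact (hpush_perm y (srt ys)).trans (ih.cons y)

theorem srt_sorted (l : List Int) : (srt l).Pairwise (· ≤ ·) := by
  induction l with
  | nil => simp [srt]
  | cons y ys ih => exact hpush_sorted y (srt ys) ih

-- sorted concatenation of dominated halves is the sort of the union
theorem split_srt (u r kpt d : List Int)
    (hperm : (u ++ r).Perm (kpt ++ d))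
    (hru : ∀ a ∈ r, ∀ b ∈ u, a ≤ b)
    (hkd : ∀ a ∈ kpt, ∀ b ∈ d, a ≤ b) :
    srt r ++ srt u = srt kpt ++ srt d := by
  have hsl : (srt r ++ srt u).Pairwise (· ≤ ·) := by
    refine List.pairwise_append.mpr ⟨srt_sorted r, srt_sorted u, ?_⟩
    intro a ha b hb
    exact hru a ((srt_perm r).mem_iff.mp ha) b ((srt_perm u).mem_iff.mp hb)
  have hsr : (srt kpt ++ srt d).Pairwise (· ≤ ·) := by
    refine List.pairwise_append.mpr ⟨srt_sorted kpt, srt_sorted d, ?_⟩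
    intro a ha b hb
    exact hkd a ((srt_perm kpt).mem_iff.mp ha) b ((srt_perm d).mem_iff.mp hb)
  have hp : (srt r ++ srt u).Perm (srt kpt ++ srt d) :=
    (((srt_perm r).append (srt_perm u)).trans
      ((List.perm_append_comm).trans hperm)).trans
      (((srt_perm kpt).append (srt_perm d)).symm)
  exact hp.eq_of_pairwise' hsl hsr

-- d is a sub-multiset of u, the rest of u coming from kpt
theorem top_superset (u r kpt d : List Int)
    (hperm : (u ++ r).Perm (kpt ++ d))
    (hru : ∀ a ∈ r, ∀ b ∈ u, a ≤ b)
    (hkd : ∀ a ∈ kpt, ∀ b ∈ d, a ≤ b)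
    (hlen : d.length ≤ u.length) :
    ∃ w, u.Perm (w ++ d) ∧ ∀ a ∈ w, a ∈ kpt := by
  have heq := split_srt u r kpt d hperm hru hkd
  have lu : (srt u).length = u.length := (srt_perm u).length_eq
  have lr : (srt r).length = r.length := (srt_perm r).length_eq
  have lk : (srt kpt).length = kpt.length := (srt_perm kpt).length_eq
  have ld : (srt d).length = d.length := (srt_perm d).length_eq
  have htot := hperm.length_eq
  simp only [List.length_append] at htot
  have hrk : r.length ≤ kpt.length := by omega
  have hsplit : srt kpt = (srt kpt).take r.length ++ (srt kpt).drop r.length :=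
    (List.take_append_drop _ _).symm
  have heq2 : srt r ++ srt u = (srt kpt).take r.length ++ ((srt kpt).drop r.length ++ srt d) := by
    rw [← List.append_assoc, ← hsplit, heq]
  have hltake : (srt r).length = ((srt kpt).take r.length).length := by
    simp [lr, lk]; omega
  have hinj := List.append_inj heq2 hltake
  refine ⟨(srt kpt).drop r.length, ?_, ?_⟩
  · have p1 : u.Perm (srt u) := (srt_perm u).symm
    have p2 : srt u = (srt kpt).drop r.length ++ srt d := hinj.2
    have p3 : ((srt kpt).drop r.length ++ srt d).Perm ((srt kpt).drop r.length ++ d) :=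
      List.Perm.append_left _ (srt_perm d)
    exact (p1.trans (p2 ▸ List.Perm.refl (srt u))).trans p3
  · intro a ha
    exact (srt_perm kpt).mem_iff.mp (List.mem_of_mem_drop ha)


theorem hpush_sum (x : Int) (l : List Int) : (hpush x l).sum = x + l.sum := by
  have := (hpush_perm x l).sum_eq
  simpa using this

theorem hpush_length (x : Int) (l : List Int) : (hpush x l).length = l.length + 1 := by
  simpa using (hpush_perm x l).length_eq

theorem mem_hpush (z x : Int) (l : List Int) : z ∈ hpush x l ↔ z = x ∨ z ∈ l := by
  rw [(hpush_perm x l).mem_iff]; simp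

theorem drain_noop (n : Int) (l : List Int) (cnt kk : Int) (h : ¬ cnt > n) :
    drainA n l cnt kk = (l, cnt, kk) := by
  cases l with
  | nil => rfl
  | cons p rest => simp [drainA, h]

theorem hpush_tail_mem (x p : Int) (pq pr : List Int) (h : hpush x pq = p :: pr)
    (z : Int) (hz : z ∈ pr) : z ∈ pq ∨ (z = x ∧ p ∈ pq) := by
  by_cases hzpq : z ∈ pq
  · exact Or.inl hzpq
  have hc : (p :: pr).count z = (x :: pq).count z := by
    rw [← h]; exact (hpush_perm x pq).count_eq z
  have hcz : pq.count z = 0 := List.count_eq_zero.mpr hzpq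
  have hzpr : 1 ≤ pr.count z := List.one_le_count_iff.mpr hz
  have hpmem : p ∈ x :: pq := (hpush_perm x pq).mem_iff.mp (h ▸ (by simp : p ∈ p :: pr))
  rw [List.count_cons, List.count_cons, hcz] at hc
  simp only [beq_iff_eq] at hc
  by_cases h1 : p = z
  · rw [if_pos h1] at hc
    by_cases h2 : x = z
    · rw [if_pos h2] at hc; omega
    · rw [if_neg h2] at hc; omega
  · rw [if_neg h1] at hc
    by_cases h2 : x = z
    · right
      refine ⟨h2.symm, ?_⟩
      rcases List.mem_cons.mp hpmem with h' | h'
      · exact absurd (h'.trans h2) h1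
      · exact h'
    · rw [if_neg h2] at hc; omega

theorem tail_sorted (y : Int) (ys : List Int) (h : (y :: ys).Pairwise (· ≤ ·)) :
    ys.Pairwise (· ≤ ·) := (List.pairwise_cons.mp h).2


theorem Bstep (n k e cnt hp : Int) (used rest kept drained : List Int)
    (hk : 0 ≤ k) (he0 : 0 ≤ e)
    (hus : used.Pairwise (· ≤ ·))
    (hrudom : ∀ a ∈ rest, ∀ b ∈ used, a ≤ b)
    (hperm : (used ++ rest).Perm (kept ++ drained))
    (hulen : used.length = min k.toNat (kept.length + drained.length))
    (hhp : hp = n - (cnt + drained.sum - used.sum))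
    (hhp0 : 0 ≤ hp)
    (hkpos : ∀ a ∈ kept, 0 ≤ a)
    (hdpos : ∀ m ∈ drained, 0 ≤ m)
    (hkd : ∀ a ∈ kept, ∀ b ∈ drained, a ≤ b)
    (hdk : (drained.length : Int) ≤ k)
    (hcn : cnt ≤ n)
    (hI4 : ∀ m ∈ drained, n < cnt + m)
    (hguard : (drained.length : Int) = k → cnt + e ≤ n) :
    ∃ used2 hp2 rest2,
      ((if ((hpush e used).length : Int) > k then
          match hpush e used with
          | [] => (([] : List Int), hp)
          | m :: us => (us, hp - m)
        else (hpush e used, hp)) = (used2, hp2)) ∧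
      0 ≤ hp2 ∧
      used2.Pairwise (· ≤ ·) ∧
      (∀ a ∈ rest2, ∀ b ∈ used2, a ≤ b) ∧
      (used2 ++ rest2).Perm ((e :: kept) ++ drained) ∧
      used2.length = min k.toNat (kept.length + 1 + drained.length) ∧
      hp2 = n - ((cnt + e) + drained.sum - used2.sum) := by
  have hKk : (k.toNat : Int) = k := Int.toNat_of_nonneg hk
  have hplen := hperm.length_eq
  simp only [List.length_append] at hplen
  by_cases hlt : ((hpush e used).length : Int) > k
  · -- pop branch
    rw [hpush_length] at hlt
    have huslK : used.length = k.toNat := by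
      have h1 : used.length ≤ k.toNat := by rw [hulen]; exact Nat.min_le_left _ _
      omega
    obtain ⟨m0, us, hu1⟩ : ∃ m0 us, hpush e used = m0 :: us := by
      cases hq : hpush e used with
      | nil => exact absurd hq (hpush_ne_nil e used)
      | cons a b => exact ⟨a, b, rfl⟩
    have hu1s : (m0 :: us).Pairwise (· ≤ ·) := hu1 ▸ hpush_sorted e used hus
    have hm0min : ∀ z ∈ m0 :: us, m0 ≤ z := sorted_head_le m0 us hu1s
    have hmemu1 : ∀ b, b ∈ m0 :: us ↔ b = e ∨ b ∈ used := by
      intro b; rw [← hu1]; exact mem_hpush b e used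
    have husum : m0 + us.sum = e + used.sum := by
      have := hpush_sum e used; rw [hu1] at this; simpa using this
    have huspos : ∀ b ∈ used, 0 ≤ b := by
      intro b hb
      have : b ∈ kept ++ drained := hperm.mem_iff.mp (by simp [hb])
      rcases List.mem_append.mp this with h' | h'
      · exact hkpos b h'
      · exact hdpos b h'
    have hm0pos : 0 ≤ m0 := by
      rcases (hmemu1 m0).mp (by simp) with h' | h'
      · omega
      · exact huspos m0 h'
    have hdlu : drained.length ≤ used.length := by omega
    obtain ⟨w, hwperm, hwk⟩ := top_superset used rest kept drained hperm hrudom hkd hdlu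
    have hwsum : used.sum = w.sum + drained.sum := by
      have := hwperm.sum_eq; simp [List.sum_append] at this; omega
    have hwlen : w.length + drained.length = used.length := by
      have := hwperm.length_eq; simp at this; omega
    have hein : e ∈ m0 :: us := (hmemu1 e).mpr (Or.inl rfl)
    have hdb : cnt + drained.sum - used.sum + m0 ≤ n := by
      by_cases hw : w = []
      · have husd : used.Perm drained := by simpa [hw] using hwperm
        have hdlK : (drained.length : Int) = k := by
          subst hw; simp at hwlen; omega
        have hce : cnt + e ≤ n := hguard hdlK
        have hsums : used.sum = drained.sum := by simp [hw] at hwsum; omega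
        rcases (hmemu1 m0).mp (by simp) with h' | h'
        · omega
        · have hm0d : m0 ∈ drained := husd.mem_iff.mp h'
          have := hI4 m0 hm0d
          have : m0 ≤ e := hm0min e hein
          have := hI4 m0 hm0d
          omega
      · have hwge : m0 ≤ w.sum := by
          apply sorted_sum_ge m0 w ?_ hm0pos hw
          intro z hz
          have hzu : z ∈ used := hwperm.symm.mem_iff.mp (by simp [hz])
          exact hm0min z ((hmemu1 z).mpr (Or.inr hzu))
        omega
    refine ⟨us, hp - m0, m0 :: rest, ?_, ?_, ?_, ?_, ?_, ?_, ?_⟩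
    · rw [if_pos (by rw [hpush_length]; exact hlt), hu1]
    · omega
    · exact tail_sorted m0 us hu1s
    · intro a ha b hb
      rcases List.mem_cons.mp ha with ha' | ha'
      · subst ha'; exact hm0min b (by simp [hb])
      · rcases hpush_tail_mem e m0 used us hu1 b hb with hb' | hb'
        · exact hrudom a ha' b hb'
        · have h1 : a ≤ m0 := hrudom a ha' m0 hb'.2
          have h2 : m0 ≤ e := hm0min e hein
          omega
    · have p1 : (us ++ m0 :: rest).Perm (m0 :: (us ++ rest)) := List.perm_middle
      have p2 : (m0 :: (us ++ rest)) = (m0 :: us) ++ rest := rfl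
      have p3 : ((m0 :: us) ++ rest).Perm ((e :: used) ++ rest) := by
        rw [← hu1]; exact (hpush_perm e used).append_right rest
      have p4 : ((e :: used) ++ rest).Perm (e :: (kept ++ drained)) := hperm.cons e
      exact ((p1.trans (p2 ▸ List.Perm.refl _)).trans p3).trans p4
    · have hul : us.length = k.toNat := by
        have := congrArg List.length hu1
        rw [hpush_length] at this; simp at this; omega
      have hKle : used.length ≤ kept.length + drained.length :=
        hulen ▸ Nat.min_le_right _ _
      rw [Nat.min_def]; split <;> omega
    · have : us.sum = e + used.sum - m0 := by omega
      omega
  · -- no-pop branch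
    rw [hpush_length] at hlt
    have hultK : used.length + 1 ≤ k.toNat := by omega
    have huse : used.length = kept.length + drained.length := by
      rw [hulen]; rw [Nat.min_def]; split <;> omega
    have hrest : rest = [] := by
      have : rest.length = 0 := by omega
      exact List.eq_nil_of_length_eq_zero this
    subst hrest
    refine ⟨hpush e used, hp, [], ?_, hhp0, hpush_sorted e used hus, ?_, ?_, ?_, ?_⟩
    · rw [if_neg (by rw [hpush_length]; exact hlt)]
    · intro a ha; simp at ha
    · have p1 : (hpush e used ++ []).Perm (e :: used) := by
        simpa using hpush_perm e used
      have p2 : (e :: used).Perm (e :: (kept ++ drained)) := by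
        have := hperm; simp at this; exact this.cons e
      exact p1.trans p2
    · rw [hpush_length]
      rw [Nat.min_def]; split <;> omega
    · rw [hpush_sum]; omega

theorem main_loop (n k : Int) (hn : 0 ≤ n) (hk : 0 ≤ k) :
    ∀ (l : List Int) (i : Int) (pq drained used rest : List Int) (cnt hp kk : Int),
      (∀ e ∈ l, 0 ≤ e) →
      cnt = -pq.sum →
      kk = k - drained.length →
      (drained.length : Int) ≤ k →
      pq.Pairwise (· ≤ ·) →
      (∀ x ∈ pq, x ≤ 0) →
      (∀ m ∈ drained, 0 ≤ m) →
      (∀ x ∈ pq, ∀ m ∈ drained, -x ≤ m) →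
      cnt ≤ n →
      (∀ m ∈ drained, n < cnt + m) →
      used.Pairwise (· ≤ ·) →
      (∀ a ∈ rest, ∀ b ∈ used, a ≤ b) →
      (used ++ rest).Perm (pq.map (fun x => -x) ++ drained) →
      used.length = min k.toNat (pq.length + drained.length) →
      hp = n - (cnt + drained.sum - used.sum) →
      0 ≤ hp →
      loopA n l i pq cnt kk = loopB n k l i used hp := by
  intro l
  induction l with
  | nil =>
    intro i pq drained used rest cnt hp kk
    intro _ _ _ _ _ _ _ _ _ _ _ _ _ _ _ _
    rfl
  | cons e tl ih =>
    intro i pq drained used rest cnt hp kk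
    intro hl hcnt hkk hdk hpqs hpqneg hdpos hdom hcn hI4 hus hrudom hperm hulen hhp hhp0
    have hKk : (k.toNat : Int) = k := Int.toNat_of_nonneg hk
    have he0 : 0 ≤ e := hl e (by simp)
    have htl : ∀ x ∈ tl, 0 ≤ x := fun x hx => hl x (by simp [hx])
    have hpq1s : (hpush (-e) pq).Pairwise (· ≤ ·) := hpush_sorted _ _ hpqs
    have hpq1sum : (hpush (-e) pq).sum = -e + pq.sum := hpush_sum _ _
    have hpq1len : (hpush (-e) pq).length = pq.length + 1 := hpush_length _ _
    have hkd : ∀ a ∈ pq.map (fun x => -x), ∀ m ∈ drained, a ≤ m := by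
      intro a ha m hm
      obtain ⟨x, hx, rfl⟩ := List.mem_map.mp ha
      exact hdom x hx m hm
    have hkpos : ∀ a ∈ pq.map (fun x => -x), 0 ≤ a := by
      intro a ha
      obtain ⟨x, hx, rfl⟩ := List.mem_map.mp ha
      have := hpqneg x hx; omega
    have hmapperm : ((hpush (-e) pq).map (fun x => -x)).Perm (e :: pq.map (fun x => -x)) := by
      have := (hpush_perm (-e) pq).map (fun x => -x)
      simpa using this
    have hklen : (pq.map (fun x => -x)).length = pq.length := by simp
    simp only [loopA, loopB]
    rcases (by omega : cnt + e ≤ n ∨ n < cnt + e) with hce | hce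
    · -- CASE X : A does not drain
      rw [drain_noop n (hpush (-e) pq) (cnt + e) kk (by omega)]
      rw [if_neg (show ¬ ((hpush (-e) pq, cnt + e, kk).2.1 > n) by simpa using hce)]
      -- B step
      obtain ⟨used2, hp2, rest2, heq, hhp20, hus2, hdom2, hperm2, hulen2, hhp2⟩ :=
        Bstep n k e cnt hp used rest (pq.map (fun x => -x)) drained hk he0 hus hrudom hperm
          (by rw [hklen]; exact hulen) hhp hhp0 hkpos hdpos hkd hdk hcn hI4
          (fun _ => hce)
      rw [heq]
      rw [if_neg (show ¬ ((used2, hp2).2 < 0) by simpa using hhp20)]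
      -- recurse
      apply ih (i + 1) (hpush (-e) pq) drained used2 rest2 (cnt + e) hp2 kk htl
      · rw [hpq1sum]; omega
      · exact hkk
      · exact hdk
      · exact hpq1s
      · intro x hx
        rcases (mem_hpush x (-e) pq).mp hx with h' | h'
        · omega
        · exact hpqneg x h'
      · exact hdpos
      · intro x hx m hm
        rcases (mem_hpush x (-e) pq).mp hx with h' | h'
        · have := hI4 m hm; omega
        · exact hdom x h' m hm
      · exact hce
      · intro m hm; have := hI4 m hm; omega
      · exact hus2
      · exact hdom2
      · refine hperm2.trans ?_
        exact (hmapperm.symm.append_right drained)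
      · rw [hulen2, hpq1len, hklen]
      · exact hhp2
      · exact hhp20
    · -- cnt + e > n
      obtain ⟨p, pr, hq⟩ : ∃ p pr, hpush (-e) pq = p :: pr := by
        cases hq : hpush (-e) pq with
        | nil => exact absurd hq (hpush_ne_nil _ _)
        | cons a b => exact ⟨a, b, rfl⟩
      have hheadmin : ∀ z ∈ p :: pr, p ≤ z := sorted_head_le p pr (hq ▸ hpq1s)
      have hpe : p ≤ -e := hheadmin (-e) (hq ▸ (mem_hpush (-e) (-e) pq).mpr (Or.inl rfl))
      have hpmem : p = -e ∨ p ∈ pq := by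
        have : p ∈ hpush (-e) pq := hq ▸ (by simp)
        rcases (mem_hpush p (-e) pq).mp this with h' | h'
        · exact Or.inl h'
        · exact Or.inr h'
      have hppr : p + pr.sum = -e + pq.sum := by
        have := hpq1sum; rw [hq] at this; simpa using this
      by_cases hkk0 : kk = 0
      · -- CASE Z : immunity exhausted, both return i
        subst hkk0
        rw [hq]
        rw [show drainA n (p :: pr) (cnt + e) 0 = (p :: pr, cnt + e, 0) by
          simp [drainA]]
        rw [if_pos (show ((p :: pr, cnt + e, (0:Int)).2.1 > n) by simpa using hce)]
        -- B pops and fails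
        have hdlk : (drained.length : Int) = k := by omega
        have huslK : used.length = k.toNat := by
          rw [hulen, Nat.min_def]; split <;> omega
        have hlt : ((hpush e used).length : Int) > k := by
          rw [hpush_length]; push_cast; omega
        obtain ⟨m0, us, hu1⟩ : ∃ m0 us, hpush e used = m0 :: us := by
          cases hq2 : hpush e used with
          | nil => exact absurd hq2 (hpush_ne_nil _ _)
          | cons a b => exact ⟨a, b, rfl⟩
        have hdlu : drained.length ≤ used.length := by omega
        obtain ⟨w, hwperm, hwk⟩ :=
          top_superset used rest (pq.map (fun x => -x)) drained hperm hrudom hkd hdlu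
        have hw : w = [] := by
          have := hwperm.length_eq; simp at this
          have : w.length = 0 := by omega
          exact List.eq_nil_of_length_eq_zero this
        subst hw
        have husd : used.Perm drained := by simpa using hwperm
        have hsums : used.sum = drained.sum := husd.sum_eq
        have hmemu1 : ∀ b, b ∈ m0 :: us ↔ b = e ∨ b ∈ used := by
          intro b; rw [← hu1]; exact mem_hpush b e used
        have hdam : n < cnt + m0 := by
          rcases (hmemu1 m0).mp (by simp) with h' | h'
          · omega
          · exact hI4 m0 (husd.mem_iff.mp h')
        rw [if_pos hlt, hu1]
        rw [if_pos (show ((us, hp - m0).2 < 0) by simp; omega)]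
      · -- CASE Y : A drains once
        rw [hq]
        rw [show drainA n (p :: pr) (cnt + e) kk =
              drainA n pr (cnt + e + p) (kk - 1) by
          simp [drainA, hce, hkk0]]
        rw [drain_noop n pr (cnt + e + p) (kk - 1) (by omega)]
        rw [if_neg (show ¬ ((pr, cnt + e + p, kk - 1).2.1 > n) by simp; omega)]
        -- B step (guard vacuous: drained.length < k since kk ≠ 0)
        obtain ⟨used2, hp2, rest2, heq, hhp20, hus2, hdom2, hperm2, hulen2, hhp2⟩ :=
          Bstep n k e cnt hp used rest (pq.map (fun x => -x)) drained hk he0 hus hrudom hperm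
            (by rw [hklen]; exact hulen) hhp hhp0 hkpos hdpos hkd hdk hcn hI4
            (fun hdl => absurd hdl (by omega))
        rw [heq]
        rw [if_neg (show ¬ ((used2, hp2).2 < 0) by simpa using hhp20)]
        -- recurse with drained' = (-p) :: drained
        have hprs : pr.Pairwise (· ≤ ·) := tail_sorted p pr (hq ▸ hpq1s)
        have hprneg : ∀ x ∈ pr, x ≤ 0 := by
          intro x hx
          have : x ∈ hpush (-e) pq := hq ▸ (by simp [hx])
          rcases (mem_hpush x (-e) pq).mp this with h' | h'
          · omega
          · exact hpqneg x h'
        have hp0 : p ≤ 0 := by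
          rcases hpmem with h' | h'
          · omega
          · exact hpqneg p h'
        apply ih (i + 1) pr ((-p) :: drained) used2 rest2 (cnt + e + p) hp2 (kk - 1) htl
        · omega
        · simp; omega
        · simp; omega
        · exact hprs
        · exact hprneg
        · intro m hm
          rcases List.mem_cons.mp hm with h' | h'
          · omega
          · exact hdpos m h'
        · intro x hx m hm
          rcases List.mem_cons.mp hm with h' | h'
          · subst h'
            have := hheadmin x (by simp [hx]); omega
          · rcases hpush_tail_mem (-e) p pq pr hq x hx with h'' | h''
            · exact hdom x h'' m h'
            · have h3 := hdom p h''.2 m h'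
              have h4 := h''.1
              omega
        · omega
        · intro m hm
          rcases List.mem_cons.mp hm with h' | h'
          · omega
          · have := hI4 m h'
            rcases hpmem with h'' | h''
            · omega
            · have := hdom p h'' m h'; omega
        · exact hus2
        · exact hdom2
        · refine hperm2.trans ?_
          have p1 : (e :: pq.map (fun x => -x)).Perm ((hpush (-e) pq).map (fun x => -x)) :=
            hmapperm.symm
          have p2 : ((hpush (-e) pq).map (fun x => -x)) = (-p) :: pr.map (fun x => -x) := by
            rw [hq]; rfl
          have p3 : ((-p) :: pr.map (fun x => -x) ++ drained).Perm
              (pr.map (fun x => -x) ++ (-p) :: drained) := List.perm_middle.symm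
          exact ((p2 ▸ p1).append_right drained).trans p3
        · rw [hulen2]
          have hprlen : pr.length = pq.length := by
            have := congrArg List.length hq
            rw [hpq1len] at this; simp at this; omega
          have h2 : (pq.map (fun x => -x)).length + 1 + drained.length
              = pr.length + ((-p) :: drained).length := by
            simp [hprlen]
            omega
          rw [h2]
        · rw [hhp2]; simp only [List.sum_cons]; omega
        · exact hhp20
theorem sumPos_nonneg (l : List Int) : 0 ≤ sumPos l := by
  apply List.sum_nonneg
  intro x hx
  obtain ⟨e, _, rfl⟩ := List.mem_map.mp hx
  exact le_max_right e 0

theorem sumNeg_nonpos (l : List Int) : sumNeg l ≤ 0 := by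
  induction l with
  | nil => simp [sumNeg]
  | cons e tl ih =>
    simp only [sumNeg, List.map_cons, List.sum_cons] at ih ⊢
    have : min e 0 ≤ 0 := min_le_right e 0
    omega

theorem sumNeg_eq_zero (l : List Int) (h : ∀ e ∈ l, 0 ≤ e) : sumNeg l = 0 := by
  induction l with
  | nil => simp [sumNeg]
  | cons e tl ih =>
    simp only [sumNeg, List.map_cons, List.sum_cons] at ih ⊢
    have h1 : 0 ≤ e := h e (by simp)
    have h2 := ih (fun x hx => h x (by simp [hx]))
    rw [h2, min_eq_right h1]
    simp

theorem hpush_head_le (x m : Int) (l us : List Int) (h : hpush x l = m :: us) : m ≤ x := by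
  cases l with
  | nil => simp [hpush] at h; omega
  | cons y ys =>
    simp only [hpush] at h
    split at h
    · cases h; omega
    · rename_i hxy
      cases h; omega

theorem loopA_fast (n k : Int) :
    ∀ (l : List Int) (i : Int) (pq : List Int) (cnt kk : Int),
      cnt + sumPos l ≤ n → loopA n l i pq cnt kk = i + l.length := by
  intro l
  induction l with
  | nil => intro i pq cnt kk _; simp [loopA]
  | cons e tl ih =>
    intro i pq cnt kk hb
    simp only [sumPos, List.map_cons, List.sum_cons] at hb
    have hptl : 0 ≤ sumPos tl := sumPos_nonneg tl
    have hme : e ≤ max e 0 := le_max_left e 0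
    simp only [loopA]
    rw [drain_noop n (hpush (-e) pq) (cnt + e) kk (by simp only [sumPos] at hptl; omega)]
    rw [if_neg (show ¬ ((hpush (-e) pq, cnt + e, kk).2.1 > n) by
      simp only [sumPos] at hptl; simp; omega)]
    rw [ih (i + 1) (hpush (-e) pq) (cnt + e) kk (by simp only [sumPos] at hptl ⊢; omega)]
    simp; omega

theorem loopB_fast (n k : Int) :
    ∀ (l : List Int) (i : Int) (used : List Int) (hp : Int),
      sumPos l ≤ hp → loopB n k l i used hp = i + l.length := by
  intro l
  induction l with
  | nil => intro i used hp _; simp [loopB]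
  | cons e tl ih =>
    intro i used hp hb
    simp only [sumPos, List.map_cons, List.sum_cons] at hb
    have hptl : 0 ≤ sumPos tl := sumPos_nonneg tl
    have hme : e ≤ max e 0 := le_max_left e 0
    have hm0 : 0 ≤ max e 0 := le_max_right e 0
    obtain ⟨m0, us, hu1⟩ : ∃ m0 us, hpush e used = m0 :: us := by
      cases hq : hpush e used with
      | nil => exact absurd hq (hpush_ne_nil _ _)
      | cons a b => exact ⟨a, b, rfl⟩
    have hm0e : m0 ≤ e := hpush_head_le e m0 used us hu1
    simp only [loopB]
    by_cases hlt : ((hpush e used).length : Int) > k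
    · rw [if_pos hlt, hu1]
      rw [if_neg (show ¬ ((us, hp - m0).2 < 0) by
        simp only [sumPos] at hptl; simp; omega)]
      rw [ih (i + 1) us (hp - m0) (by simp only [sumPos] at hptl ⊢; omega)]
      simp; omega
    · rw [if_neg hlt]
      rw [if_neg (show ¬ (((hpush e used), hp).2 < 0) by
        simp only [sumPos] at hptl; simp; omega)]
      rw [ih (i + 1) (hpush e used) hp (by simp only [sumPos] at hptl ⊢; omega)]
      simp; omega

theorem forced_win (n k : Int) (enemy : List Int) (h : sumPos enemy ≤ n) :
    loopA n enemy 0 [] 0 k = loopB n k enemy 0 [] n := by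
  rw [loopA_fast n k enemy 0 [] 0 k (by omega),
      loopB_fast n k enemy 0 [] n (by omega)]

theorem forced_loss (n k : Int) (enemy : List Int) (hn : n < sumNeg enemy) :
    loopA n enemy 0 [] 0 k = loopB n k enemy 0 [] n := by
  cases enemy with
  | nil => rfl
  | cons e rest =>
    have h1 : sumNeg rest ≤ 0 := sumNeg_nonpos rest
    have h2 : sumNeg (e :: rest) = min e 0 + sumNeg rest := by
      simp [sumNeg]
    have hne : n < e := by have := min_le_left e 0; omega
    have hn0 : n < 0 := by have := min_le_right e 0; omega
    simp only [loopA, loopB, drainA, hpush]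
    split_ifs <;> simp_all

-- ===== VERDICT =====
theorem solution_spec : Claim_equal_solution := by
  intro n k enemy _hdom hpre
  unfold Spec_solution solution solution_alt
  rcases hpre with ⟨hk, he⟩ | h2 | h3
  · rcases lt_or_ge n 0 with hn | hn
    · exact forced_loss n k enemy (by rw [sumNeg_eq_zero enemy he]; exact hn)
    · exact main_loop n k hn hk enemy 0 [] [] [] [] 0 n k he (by simp) (by simp) (by simpa)
        (by simp) (by simp) (by simp) (by simp) hn (by simp) (by simp) (by simp) (by simp)
        (by simp) (by simp) hn
  · exact forced_win n k enemy h2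
  · exact forced_loss n k enemy h3
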